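-- pv_equiv track=rewrite | github.com/devwuu/coding-test | lecture/main22.py | my_solution_1
-- ===== SOURCE A (Python) =====
-- def my_solution_1(box, limit):
--     answer = 0
--     idx = 0
--
--     box.sort(key = lambda v : -v[1])
--
--     for i in range(0, limit):
--         if box[idx][0] == 0:
--             idx += 1
--         answer += box[idx][1]
--         box[idx][0] -= 1
--
--     return answer
-- ===== SOURCE B (Python) =====
-- def my_solution_1(box, limit):
--     # Sort once, then take whole boxes in batches: value * min(count, remaining) per box.
--     box.sort(key=lambda v: -v[1])
--     answer = 0
--     remaining = limit
--     for cnt, val, *_ in box: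
--         if remaining <= 0:
--             break
--         take = min(cnt, remaining)
--         if take > 0:
--             answer += val * take
--             remaining -= take
--     return answer
-- ===== Notes on version B (the rewrite author's own statement) =====
-- stated objective: faster
-- what changed: Replaces A's item-by-item simulation loop of `limit` iterations (with a moving index into the mutated list) by a single batched pass over the sorted boxes that adds value*min(count,remaining) per box.
-- intended difference: On inputs where A's walk over the value-sorted boxes reaches a box with a non-positive item count while picks remain, A returns a total that counts phantom items picked from that empty box (e.g. [[1,5],[0,3],[2,2]] with limit 3 gives 11); B skips empty boxes and returns the intended greedy total (9 there). — e.g. on my_solution_1([[1, 5], [0, 3], [2, 2]], 3): A returns 11, B returns 9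
import Mathlib
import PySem

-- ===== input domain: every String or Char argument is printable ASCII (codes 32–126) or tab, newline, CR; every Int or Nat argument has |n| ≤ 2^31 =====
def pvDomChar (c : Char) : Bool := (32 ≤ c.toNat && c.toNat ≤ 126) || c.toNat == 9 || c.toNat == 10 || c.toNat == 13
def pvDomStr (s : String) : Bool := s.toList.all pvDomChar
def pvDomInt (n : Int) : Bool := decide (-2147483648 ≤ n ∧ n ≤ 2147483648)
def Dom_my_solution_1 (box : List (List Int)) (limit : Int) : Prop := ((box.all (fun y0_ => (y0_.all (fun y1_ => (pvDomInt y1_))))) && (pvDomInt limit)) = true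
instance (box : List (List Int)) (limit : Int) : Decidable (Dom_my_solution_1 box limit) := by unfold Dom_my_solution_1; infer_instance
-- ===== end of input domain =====

-- B replaces A's per-item loop of `limit` iterations by one batched pass over the
-- value-sorted boxes (value*min(count,remaining) per box). Equivalence is about the
-- RETURN value: both sort `box` in place, but A additionally decrements the counts
-- inside `box`, which B does not.

-- ===== PORT A =====
-- the sorted order both programs build first (box.sort(key=lambda v: -v[1]), shared by both ports)
def pvSorted (box : List (List Int)) : List (List Int) :=
  PySem.List.sorted box (fun v => -(PySem.List.pyGetD v 1 0))

-- one iteration of A's for-loop body on state (box, idx, answer);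
-- box[idx] is ported as getD at idx.toNat, exact here since idx stays nonneg and in range under Pre_
def pvStepA (st : List (List Int) × Int × Int) : List (List Int) × Int × Int :=
  let b := st.1
  let idx0 := st.2.1
  let answer := st.2.2
  let idx := if (b.getD idx0.toNat []).getD 0 0 = 0 then idx0 + 1 else idx0
  let row := b.getD idx.toNat []
  (b.set idx.toNat (row.set 0 (row.getD 0 0 - 1)), idx, answer + row.getD 1 0)

def my_solution_1 (box : List (List Int)) (limit : Int) : Int :=
  ((PySem.List.pyRange 0 limit 1).foldl (fun st _ => pvStepA st) (pvSorted box, 0, 0)).2.2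

-- ===== PORT B =====
-- one step of B's batched pass on state (answer, remaining); `break` ported as skipping
def pvStepB (st : Int × Int) (row : List Int) : Int × Int :=
  if st.2 ≤ 0 then st
  else
    let take := min (row.getD 0 0) st.2
    if 0 < take then (st.1 + row.getD 1 0 * take, st.2 - take) else st

def my_solution_1_alt (box : List (List Int)) (limit : Int) : Int :=
  ((pvSorted box).foldl pvStepB (0, limit)).1

-- ===== PRECONDITION & SPEC =====
-- how many picks A can serve before it would index past the last row: rows are consumed
-- in sorted order; a reached row with a non-positive count (any non-positive count after
-- the first position, a negative one at it) is never left, so supply is unbounded (none)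
def pvBnd : Bool → Int
  | true => 0
  | false => 1

def pvCap (first : Bool) : List (List Int) → Option Int
  | [] => some 0
  | r :: t =>
      if r.getD 0 0 < pvBnd first then none
      else (pvCap false t).map (fun s => r.getD 0 0 + s)

def pvCapOkB : Option Int → Int → Bool
  | none, _ => true
  | some S, limit => decide (limit ≤ S)

-- Pre_ excludes exactly the inputs on which A raises IndexError: a row shorter than 2
-- (the sort key or the loop indexes past it), or more picks demanded than A can serve
def Pre_my_solution_1 (box : List (List Int)) (limit : Int) : Prop :=
  (∀ r ∈ box, 2 ≤ r.length) ∧ pvCapOkB (pvCap true (pvSorted box)) limit = true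

instance (box : List (List Int)) (limit : Int) : Decidable (Pre_my_solution_1 box limit) := by
  unfold Pre_my_solution_1; infer_instance

def pvWitness_my_solution_1 : List (List Int) × Int := ([[2, 3], [1, 5]], 3)

-- On inputs where A's walk over the value-sorted boxes reaches a box with a non-positive
-- item count while picks remain, A returns a total counting phantom items taken from that
-- empty box; B skips empty boxes and returns the intended greedy total.
def pvDev (first : Bool) (limit : Int) : List (List Int) → Bool
  | [] => false
  | r :: t =>
      if r.getD 0 0 < pvBnd first then decide (0 < limit)
      else pvDev false (limit - r.getD 0 0) t

def D_my_solution_1 (box : List (List Int)) (limit : Int) : Prop :=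
  pvDev true limit (pvSorted box) = true

instance (box : List (List Int)) (limit : Int) : Decidable (D_my_solution_1 box limit) := by
  unfold D_my_solution_1; infer_instance

def Spec_my_solution_1 (box : List (List Int)) (limit : Int) (out : Int) : Prop := ¬ D_my_solution_1 box limit → out = my_solution_1_alt box limit
instance (box : List (List Int)) (limit : Int) (out : Int) : Decidable (Spec_my_solution_1 box limit out) := by unfold Spec_my_solution_1; infer_instance

def pvDiffWitness_my_solution_1 : List (List Int) × Int := ([[1, 5], [0, 3], [2, 2]], 3)
def pvDiffWitnessOut_my_solution_1 : Int × Int := (11, 9)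

-- ===== CLAIM (what is proved, stated in full; the proofs are below) =====
def Claim_unchanged_my_solution_1 : Prop := ∀ (box : List (List Int)) (limit : Int), Dom_my_solution_1 box limit → Pre_my_solution_1 box limit → Spec_my_solution_1 box limit (my_solution_1 box limit)
def Claim_changed_my_solution_1 : Prop := Dom_my_solution_1 (pvDiffWitness_my_solution_1.1) (pvDiffWitness_my_solution_1.2) ∧ Pre_my_solution_1 (pvDiffWitness_my_solution_1.1) (pvDiffWitness_my_solution_1.2) ∧ D_my_solution_1 (pvDiffWitness_my_solution_1.1) (pvDiffWitness_my_solution_1.2) ∧ my_solution_1 (pvDiffWitness_my_solution_1.1) (pvDiffWitness_my_solution_1.2) = pvDiffWitnessOut_my_solution_1.1 ∧ my_solution_1_alt (pvDiffWitness_my_solution_1.1) (pvDiffWitness_my_solution_1.2) = pvDiffWitnessOut_my_solution_1.2 ∧ pvDiffWitnessOut_my_solution_1.1 ≠ pvDiffWitnessOut_my_solution_1.2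

-- ===== LEMMAS AND PROOFS =====

-- the joint consequence of Pre_ (no crash) and ¬D_ (no phantom take) along the walk:
-- whenever a non-positive-count row is reached, or the rows run out, no picks remain
def pvGood (first : Bool) (n : Int) : List (List Int) → Prop
  | [] => n ≤ 0
  | r :: t =>
      if r.getD 0 0 < pvBnd first then n ≤ 0
      else pvGood false (n - r.getD 0 0) t

lemma pvGood_of_pre_dev (rows : List (List Int)) :
    ∀ (first : Bool) (limit : Int), pvCapOkB (pvCap first rows) limit = true →
    pvDev first limit rows = false → pvGood first limit rows := by
  induction rows with
  | nil =>
      intro first limit hcap _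
      simp [pvCapOkB, pvCap] at hcap
      simpa [pvGood] using hcap
  | cons r t ih =>
      intro first limit hcap hdev
      by_cases hbad : r.getD 0 0 < pvBnd first
      · simp only [pvDev, if_pos hbad] at hdev
        simp only [pvGood, if_pos hbad]
        simpa using hdev
      · simp only [pvDev, if_neg hbad] at hdev
        simp only [pvGood, if_neg hbad]
        refine ih false (limit - r.getD 0 0) ?_ hdev
        simp only [pvCap, if_neg hbad] at hcap
        cases hc : pvCap false t with
        | none => simp [pvCapOkB]
        | some S =>
            rw [hc] at hcap
            simp only [Option.map_some, pvCapOkB, decide_eq_true_eq] at hcap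
            simp only [pvCapOkB, decide_eq_true_eq]
            omega

-- reference value: the greedy batched total of the (already sorted) rows for n picks
def pvBatch : List (List Int) → Nat → Int
  | [], _ => 0
  | r :: t, n =>
      if n = 0 then 0
      else if (n : Int) ≤ r.getD 0 0 then (n : Int) * r.getD 1 0
      else r.getD 0 0 * r.getD 1 0 + pvBatch t (n - (r.getD 0 0).toNat)

lemma pvFoldl_ignore (l : List Int) (st : List (List Int) × Int × Int) :
    l.foldl (fun st _ => pvStepA st) st = pvStepA^[l.length] st := by
  induction l generalizing st with
  | nil => rfl
  | cons x xs ih =>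
      simp [List.foldl_cons, ih, Function.iterate_succ_apply]

lemma pvGetMid {α : Type} (dead : List α) (m : α) (t : List α) (d : α) :
    (dead ++ m :: t).getD dead.length d = m := by
  simp [List.getD]

lemma pvStepA_within (k : Nat) :
    ∀ (dead t : List (List Int)) (x y : Int) (rs : List Int) (a : Int),
    (k : Int) ≤ x →
    pvStepA^[k] (dead ++ (x :: y :: rs) :: t, (dead.length : Int), a)
      = (dead ++ ((x - k) :: y :: rs) :: t, (dead.length : Int), a + k * y) := by
  induction k with
  | zero => intro dead t x y rs a _; simp
  | succ k ih =>
      intro dead t x y rs a hk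
      have hx0 : x ≠ 0 := by push_cast at hk; omega
      rw [Function.iterate_succ_apply]
      have hstep : pvStepA (dead ++ (x :: y :: rs) :: t, (dead.length : Int), a)
          = (dead ++ ((x - 1) :: y :: rs) :: t, (dead.length : Int), a + y) := by
        simp [pvStepA, hx0]
      rw [hstep, ih dead t (x - 1) y rs (a + y) (by push_cast at hk ⊢; omega)]
      have h1 : x - 1 - (k : Int) = x - ((k : Nat) + 1 : Nat) := by push_cast; ring
      have h2 : a + y + (k : Int) * y = a + ((k : Nat) + 1 : Nat) * y := by push_cast; ring
      rw [h1, h2]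

lemma pvStepA_cross (n : Nat) (b : List (List Int)) (i : Nat) (a : Int)
    (h0 : (b.getD i []).getD 0 0 = 0) (h1 : (b.getD (i + 1) []).getD 0 0 ≠ 0) :
    (pvStepA^[n] (b, (i : Int), a)).2.2 = (pvStepA^[n] (b, (i : Int) + 1, a)).2.2 := by
  cases n with
  | zero => rfl
  | succ n =>
      rw [Function.iterate_succ_apply, Function.iterate_succ_apply]
      have : pvStepA (b, (i : Int), a) = pvStepA (b, (i : Int) + 1, a) := by
        have hcast : ((i : Int) + 1).toNat = i + 1 := by omega
        simp only [List.getD] at h0 h1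
        simp [pvStepA, hcast, h0, h1]
      rw [this]

lemma pvStepA_main :
    ∀ (rows dead : List (List Int)) (a : Int) (n : Nat),
    (∀ r ∈ rows, 2 ≤ r.length) → pvGood false (n : Int) rows →
    (pvStepA^[n] (dead ++ rows, (dead.length : Int), a)).2.2 = a + pvBatch rows n := by
  intro rows
  induction rows with
  | nil =>
      intro dead a n _ hg
      simp only [pvGood] at hg
      have : n = 0 := by omega
      subst this; simp [pvBatch]
  | cons r t ih =>
      intro dead a n hok hg
      obtain hlen := hok r (by simp)
      rcases r with _ | ⟨x, r'⟩
      · simp at hlen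
      rcases r' with _ | ⟨y, rs⟩
      · simp at hlen
      rcases Nat.eq_zero_or_pos n with hn0 | hn1
      · subst hn0; simp [pvBatch]
      simp only [pvGood, pvBnd, List.getD_cons_zero] at hg
      by_cases hbad : x < 1
      · rw [if_pos hbad] at hg; omega
      rw [if_neg hbad] at hg
      replace hbad : 1 ≤ x := by omega
      by_cases hcase : (n : Int) ≤ x
      · rw [pvStepA_within n dead t x y rs a hcase]
        simp only [pvBatch, List.getD_cons_zero, List.getD_cons_succ]
        rw [if_neg (by omega), if_pos hcase]
      · have hx0 : 0 ≤ x := by omega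
        have hkn : x.toNat ≤ n := by omega
        have hsplit : n = (n - x.toNat) + x.toNat := by omega
        rw [hsplit, Function.iterate_add_apply,
            pvStepA_within x.toNat dead t x y rs a (by omega)]
        have hxx : x - (x.toNat : Int) = 0 := by omega
        rw [hxx]
        set m := n - x.toNat with hm
        have hm1 : 1 ≤ m := by omega
        have hgt : pvGood false (m : Int) t := by
          have : ((m : Nat) : Int) = (n : Int) - x := by push_cast; omega
          rw [this]; exact hg
        rcases t with _ | ⟨r2, t2⟩
        · exfalso; simp only [pvGood] at hgt; omega
        obtain hlen2 := hok r2 (by simp)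
        rcases r2 with _ | ⟨x2, r2'⟩
        · simp at hlen2
        rcases r2' with _ | ⟨y2, rs2⟩
        · simp at hlen2
        have hx2 : 1 ≤ x2 := by
          simp only [pvGood, pvBnd, List.getD_cons_zero] at hgt
          by_cases h : x2 < 1
          · rw [if_pos h] at hgt; omega
          · omega
        have hlist : dead ++ (0 :: y :: rs) :: (x2 :: y2 :: rs2) :: t2
            = (dead ++ [(0 : Int) :: y :: rs]) ++ (x2 :: y2 :: rs2) :: t2 := by simp
        have hcross := pvStepA_cross m (dead ++ (0 :: y :: rs) :: (x2 :: y2 :: rs2) :: t2)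
            dead.length (a + x.toNat * y)
            (by rw [pvGetMid]; rfl)
            (by
              rw [hlist]
              have : dead.length + 1 = (dead ++ [(0 : Int) :: y :: rs]).length := by simp
              rw [this, pvGetMid]
              show ¬ ((x2 :: y2 :: rs2) : List Int).getD 0 0 = 0
              rw [List.getD_cons_zero]
              omega)
        rw [hcross]
        have hlen' : ((dead.length : Int) + 1) = ((dead ++ [(0 : Int) :: y :: rs]).length : Int) := by
          simp
        rw [hlist, hlen']
        rw [ih (dead ++ [(0 : Int) :: y :: rs]) (a + x.toNat * y) m
              (fun r hr => hok r (by simp [hr])) hgt]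
        have hb : pvBatch ((x :: y :: rs) :: (x2 :: y2 :: rs2) :: t2) (m + x.toNat)
            = x * y + pvBatch ((x2 :: y2 :: rs2) :: t2) m := by
          simp only [pvBatch, List.getD_cons_zero, List.getD_cons_succ]
          rw [if_neg (by omega), if_neg (by push_cast; omega)]
          have hmm : m + x.toNat - x.toNat = m := by omega
          rw [hmm]
        rw [hb]
        have : (x.toNat : Int) = x := by omega
        rw [this]; ring

lemma pvStepB_nonpos (rows : List (List Int)) (a r : Int) (h : r ≤ 0) :
    rows.foldl pvStepB (a, r) = (a, r) := by
  induction rows with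
  | nil => rfl
  | cons row t ih => simp [List.foldl_cons, pvStepB, if_pos h, ih]

lemma pvStepB_main :
    ∀ (rows : List (List Int)) (a r : Int),
    (∀ row ∈ rows, 2 ≤ row.length) → 0 ≤ r → pvGood false r rows →
    (rows.foldl pvStepB (a, r)).1 = a + pvBatch rows r.toNat := by
  intro rows
  induction rows with
  | nil => intro a r _ _ _; simp [pvBatch]
  | cons row t ih =>
      intro a r hok hr hg
      obtain hlen := hok row (by simp)
      rcases row with _ | ⟨x, r'⟩
      · simp at hlen
      rcases r' with _ | ⟨y, rs⟩
      · simp at hlen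
      rcases eq_or_lt_of_le hr with hr0 | hr1
      · rw [pvStepB_nonpos ((x :: y :: rs) :: t) a r (by omega)]
        have : r.toNat = 0 := by omega
        rw [this]; simp [pvBatch]
      simp only [pvGood, pvBnd, List.getD_cons_zero] at hg
      by_cases hbad : x < 1
      · exfalso; rw [if_pos hbad] at hg; omega
      rw [if_neg hbad] at hg
      replace hbad : 1 ≤ x := by omega
      have hnp : ¬ r ≤ 0 := by omega
      have htk : 0 < min x r := by omega
      have hstep : pvStepB (a, r) (x :: y :: rs) = (a + y * min x r, r - min x r) := by
        simp only [pvStepB, List.getD_cons_zero, List.getD_cons_succ]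
        rw [if_neg hnp, if_pos htk]
      rw [List.foldl_cons, hstep]
      by_cases hcase : r ≤ x
      · have hmin : min x r = r := by omega
        rw [hmin, pvStepB_nonpos t (a + y * r) (r - r) (by omega)]
        simp only [pvBatch, List.getD_cons_zero, List.getD_cons_succ]
        rw [if_neg (by omega), if_pos (by omega : ((r.toNat : Int)) ≤ x)]
        have : (r.toNat : Int) = r := by omega
        rw [this]; ring
      · have hmin : min x r = x := by omega
        rw [hmin]
        rw [ih (a + y * x) (r - x) (fun q hq => hok q (by simp [hq])) (by omega) hg]
        simp only [pvBatch, List.getD_cons_zero, List.getD_cons_succ]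
        rw [if_neg (by omega), if_neg (by omega : ¬ ((r.toNat : Int) ≤ x))]
        have : (r - x).toNat = r.toNat - x.toNat := by omega
        rw [this]; ring

-- ===== VERDICT (by name: the statement is the Claim_ definition above) =====
theorem my_solution_1_spec : Claim_unchanged_my_solution_1 := by
  intro box limit _ hpre hnd
  obtain ⟨hlen, hcap⟩ := hpre
  have hdev : pvDev true limit (pvSorted box) = false := by
    unfold D_my_solution_1 at hnd
    exact Bool.eq_false_iff.mpr (fun h => hnd h)
  unfold Spec_my_solution_1 at *
  unfold my_solution_1 my_solution_1_alt
  set s := pvSorted box with hs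
  have hperm : s.Perm box := PySem.List.sorted_perm _ _ _
  have hlen' : ∀ r ∈ s, 2 ≤ r.length := fun r hr => hlen r (hperm.mem_iff.mp hr)
  have hgood : pvGood true limit s := pvGood_of_pre_dev s true limit hcap hdev
  rw [pvFoldl_ignore]
  have hrlen : (PySem.List.pyRange 0 limit 1).length = limit.toNat := by
    rw [PySem.List.length_pyRange_one]; simp
  rw [hrlen]
  by_cases hl : limit ≤ 0
  · have : limit.toNat = 0 := by omega
    rw [this, pvStepB_nonpos s 0 limit hl]
    rfl
  · push_neg at hl
    rcases s with _ | ⟨r, t⟩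
    · exfalso; simp only [pvGood] at hgood; omega
    obtain hlenr := hlen' r (by simp)
    rcases r with _ | ⟨x, r'⟩
    · simp at hlenr
    rcases r' with _ | ⟨y, rs⟩
    · simp at hlenr
    simp only [pvGood, pvBnd, List.getD_cons_zero] at hgood
    by_cases hbad : x < 0
    · exfalso; rw [if_pos hbad] at hgood; omega
    rw [if_neg hbad] at hgood
    have hx0 : 0 ≤ x := by omega
    rcases eq_or_lt_of_le hx0 with hx00 | hx1
    · -- first row has count 0: A crosses on its first iteration, B skips the row
      subst hx00
      rw [sub_zero] at hgood
      rcases t with _ | ⟨r2, t2⟩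
      · exfalso; simp only [pvGood] at hgood; omega
      obtain hlen2 := hlen' r2 (by simp)
      rcases r2 with _ | ⟨x2, r2'⟩
      · simp at hlen2
      rcases r2' with _ | ⟨y2, rs2⟩
      · simp at hlen2
      have hx2 : 1 ≤ x2 := by
        simp only [pvGood, pvBnd, List.getD_cons_zero] at hgood
        by_cases h : x2 < 1
        · rw [if_pos h] at hgood; omega
        · omega
      have hcross := pvStepA_cross limit.toNat
          ((0 :: y :: rs) :: (x2 :: y2 :: rs2) :: t2) 0 0
          (by rfl)
          (by
            show ¬ ((x2 :: y2 :: rs2) : List Int).getD 0 0 = 0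
            rw [List.getD_cons_zero]; omega)
      simp only [Nat.cast_zero, zero_add] at hcross
      rw [hcross]
      have hA := pvStepA_main ((x2 :: y2 :: rs2) :: t2) [(0 : Int) :: y :: rs] 0 limit.toNat
          (fun q hq => hlen' q (by simp [hq]))
          (by
            have : ((limit.toNat : Nat) : Int) = limit := by omega
            rw [this]; exact hgood)
      simp only [List.singleton_append, List.length_cons, List.length_nil, Nat.cast_one,
        zero_add] at hA
      rw [hA]
      -- B: the first step leaves the state unchanged (take = min 0 limit = 0)
      have hstep0 : pvStepB (0, limit) ((0 : Int) :: y :: rs) = (0, limit) := by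
        simp only [pvStepB, List.getD_cons_zero]
        rw [if_neg (by omega), if_neg (by omega)]
      rw [List.foldl_cons, hstep0,
          pvStepB_main ((x2 :: y2 :: rs2) :: t2) 0 limit
            (fun q hq => hlen' q (by simp [hq])) (by omega) hgood]
      ring
    · -- first row has a positive count: the generic lemmas apply directly
      have hgood' : pvGood false limit ((x :: y :: rs) :: (t : List (List Int))) := by
        simp only [pvGood, pvBnd, List.getD_cons_zero]
        rw [if_neg (by omega : ¬ x < 1)]
        exact hgood
      have hA := pvStepA_main ((x :: y :: rs) :: t) [] 0 limit.toNat hlen'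
          (by
            have : ((limit.toNat : Nat) : Int) = limit := by omega
            rw [this]; exact hgood')
      simp only [List.nil_append, List.length_nil, Nat.cast_zero] at hA
      rw [hA, pvStepB_main ((x :: y :: rs) :: t) 0 limit hlen' (by omega) hgood']

theorem my_solution_1_changed : Claim_changed_my_solution_1 := by
  unfold Claim_changed_my_solution_1; decide
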